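-- pv_equiv track=rewrite | github.com/sotheanith-sok/Leetcode | 2358. Maximum Number of Groups Entering a Competition.py | maximumGroups
-- ===== SOURCE A (Python) =====
-- def maximumGroups(grades: list[int]) -> int:
--
--     # Sort grades
--     grades = sorted(grades)
--
--     # Initialize the result
--     res = 0
--
--     # Initialize the sum and length of the last group
--     lTotal, lLen = 0, 0
--
--     # Initialzie the sum and length of the current group
--     cTotal, cLen = 0, 0
--
--     # Iterate through all grades
--     for grade in grades:
--
--         # Add the current grade to the sum of the current group and increment the legnth by 1
--         cTotal, cLen = cTotal + grade, cLen + 1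
--
--         # If the sum and length of the current groups are greater than previous groups,
--         if cTotal > lTotal and cLen > lLen:
--
--             # Increment the number of group
--             res += 1
--
--             # Update the sum and length of the last group
--             lTotal, lLen = cTotal, cLen
--
--             # Reset the sum and length of the current group
--             cTotal, cLen = 0, 0
--
--     return res
-- ===== SOURCE B (Python) =====
-- def maximumGroups(grades: list[int]) -> int:
--     # Prefix sums over the sorted grades, then a cut-index scan: the state is
--     # just the last two cut positions (j, i); group sums/lengths are differences
--     # of prefix sums instead of running accumulators.
--     g = sorted(grades)
--     n = len(g)
--     t = 0
--     P = [0]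
--     for x in g:
--         t += x
--         P.append(t)
--     res = 0
--     j = i = 0
--     for k in range(1, n + 1):
--         if k - i > i - j and P[k] - P[i] > P[i] - P[j]:
--             res += 1
--             j, i = i, k
--     return res
-- ===== Notes on version B (the rewrite author's own statement) =====
-- stated objective: alternative
-- what changed: B replaces A's four running accumulators (last/current group sum and length) with a precomputed prefix-sum array and a scan over cut indices that keeps only the last two cut positions, reading group sums and lengths as differences of prefix sums.
import Mathlib
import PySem

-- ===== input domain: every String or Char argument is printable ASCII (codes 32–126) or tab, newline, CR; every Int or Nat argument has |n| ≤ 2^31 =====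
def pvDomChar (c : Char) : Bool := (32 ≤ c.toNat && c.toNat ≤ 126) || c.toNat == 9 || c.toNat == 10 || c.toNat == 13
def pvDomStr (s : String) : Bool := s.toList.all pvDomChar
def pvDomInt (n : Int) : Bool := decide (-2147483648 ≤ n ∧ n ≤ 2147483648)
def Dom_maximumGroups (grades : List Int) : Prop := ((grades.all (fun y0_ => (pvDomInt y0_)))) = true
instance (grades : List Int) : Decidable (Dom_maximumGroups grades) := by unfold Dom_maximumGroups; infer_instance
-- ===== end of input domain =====

-- B replaces A's four running accumulators with a prefix-sum array plus a scan over
-- cut indices keeping only the last two cut positions (objective: alternative).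

-- ===== PORT A =====
-- loop body of A: state (res, lTotal, lLen, cTotal, cLen)
def pvStepA (s : Int × Int × Int × Int × Int) (grade : Int) : Int × Int × Int × Int × Int :=
  match s with
  | (res, lTotal, lLen, cTotal, cLen) =>
    let cTotal := cTotal + grade
    let cLen := cLen + 1
    if cTotal > lTotal ∧ cLen > lLen then
      (res + 1, cTotal, cLen, 0, 0)
    else
      (res, lTotal, lLen, cTotal, cLen)

def maximumGroups (grades : List Int) : Int :=
  let g := PySem.List.sorted grades (fun x => x) false
  (g.foldl pvStepA (0, 0, 0, 0, 0)).1

-- ===== PORT B =====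
-- loop body of B: state (res, j, i), the last two cut positions
def pvStepB (P : List Int) (s : Int × Int × Int) (k : Int) : Int × Int × Int :=
  match s with
  | (res, j, i) =>
    if k - i > i - j ∧
        PySem.List.pyGetD P k 0 - PySem.List.pyGetD P i 0 >
          PySem.List.pyGetD P i 0 - PySem.List.pyGetD P j 0 then
      (res + 1, i, k)
    else
      (res, j, i)

def maximumGroups_alt (grades : List Int) : Int :=
  let g := PySem.List.sorted grades (fun x => x) false
  let n := PySem.List.len g
  let P := (g.foldl (fun (tp : Int × List Int) x => (tp.1 + x, tp.2 ++ [tp.1 + x])) (0, [0])).2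
  ((PySem.List.pyRange 1 (n + 1) 1).foldl (pvStepB P) (0, 0, 0)).1

-- ===== PRECONDITION & SPEC =====
def Spec_maximumGroups (grades : List Int) (out : Int) : Prop := out = maximumGroups_alt grades
instance (grades : List Int) (out : Int) : Decidable (Spec_maximumGroups grades out) := by unfold Spec_maximumGroups; infer_instance

-- ===== CLAIM (what is proved, stated in full; the proofs are below) =====
def Claim_equal_maximumGroups : Prop := ∀ (grades : List Int), Dom_maximumGroups grades → Spec_maximumGroups grades (maximumGroups grades)

-- ===== LEMMAS AND PROOFS =====

-- prefix sum of the first m elements (m an Int index into B's list P)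
def pvS (g : List Int) (m : Int) : Int := (g.take m.toNat).sum

lemma pvPrefix (g : List Int) : ∀ (t : Int) (Q : List Int),
    (g.foldl (fun (tp : Int × List Int) x => (tp.1 + x, tp.2 ++ [tp.1 + x])) (t, Q)).2
      = Q ++ (List.range g.length).map (fun m => t + (g.take (m + 1)).sum) := by
  induction g with
  | nil => intro t Q; simp
  | cons x g ih =>
    intro t Q
    simp only [List.foldl_cons, ih (t + x) (Q ++ [t + x]), List.length_cons,
      List.range_succ_eq_map, List.map_cons, List.map_map, List.append_assoc]
    simp [Function.comp, add_assoc]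

lemma pvP_eq (g : List Int) :
    (g.foldl (fun (tp : Int × List Int) x => (tp.1 + x, tp.2 ++ [tp.1 + x])) (0, [0])).2
      = (List.range (g.length + 1)).map (fun m => ((g.take m).sum : Int)) := by
  rw [pvPrefix, List.range_succ_eq_map]
  simp

lemma pvGetP (g : List Int) (m : Int) (h0 : 0 ≤ m) (h1 : m ≤ (g.length : Int)) :
    PySem.List.pyGetD
      ((g.foldl (fun (tp : Int × List Int) x => (tp.1 + x, tp.2 ++ [tp.1 + x])) (0, [0])).2) m 0
      = pvS g m := by
  rw [pvP_eq, PySem.List.pyGetD_eq_getElem (h0 := h0) (h1 := by simp; omega)]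
  simp [pvS]

lemma pvS_zero (g : List Int) : pvS g 0 = 0 := by simp [pvS]

lemma pvS_append (u : List Int) (x : Int) (t : List Int) :
    pvS (u ++ x :: t) ((u.length : Int) + 1) = pvS (u ++ x :: t) (u.length : Int) + x := by
  have h1 : (((u.length : Int) + 1)).toNat = u.length + 1 := by omega
  have h2 : ((u.length : Int)).toNat = u.length := by omega
  simp only [pvS, h1, h2]
  rw [List.take_append, List.take_append, List.take_of_length_le (by omega)]
  simp

lemma pvMain (g t : List Int) : ∀ (u : List Int) (res j i : Int),
    g = u ++ t → 0 ≤ j → j ≤ i → i ≤ (u.length : Int) →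
    ((PySem.List.pyRange ((u.length : Int) + 1) ((g.length : Int) + 1) 1).foldl
        (pvStepB ((g.foldl (fun (tp : Int × List Int) x => (tp.1 + x, tp.2 ++ [tp.1 + x])) (0, [0])).2))
        (res, j, i)).1
      = (t.foldl pvStepA
          (res, pvS g i - pvS g j, i - j, pvS g (u.length : Int) - pvS g i, (u.length : Int) - i)).1 := by
  induction t with
  | nil =>
    intro u res j i hg _ _ _
    subst hg
    rw [PySem.List.pyRange_one_eq_nil (by simp)]
    simp
  | cons x t ih =>
    intro u res j i hg h0j hji hiu
    have hlen : g.length = u.length + t.length + 1 := by subst hg; simp; omega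
    have hlt : (u.length : Int) + 1 < (g.length : Int) + 1 := by
      push_cast [hlen]; omega
    rw [PySem.List.pyRange_one_cons hlt, List.foldl_cons]
    -- evaluate B's step at k = u.length + 1
    have hGk := pvGetP g ((u.length : Int) + 1) (by omega) (by omega)
    have hGi := pvGetP g i (by omega) (by push_cast [hlen]; omega)
    have hGj := pvGetP g j h0j (by push_cast [hlen]; omega)
    have hx : pvS g ((u.length : Int) + 1) = pvS g (u.length : Int) + x := by
      subst hg; exact pvS_append u x t
    simp only [pvStepB, hGk, hGi, hGj]
    simp only [List.foldl_cons, pvStepA]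
    by_cases hc : pvS g (u.length : Int) - pvS g i + x > pvS g i - pvS g j ∧
        (u.length : Int) - i + 1 > i - j
    · rw [if_pos (by constructor <;> omega), if_pos (by constructor <;> [exact hc.1; exact hc.2])]
      have := ih (u ++ [x]) (res + 1) i ((u.length : Int) + 1)
        (by subst hg; simp) (by omega) (by omega) (by simp)
      simp only [List.length_append, List.length_cons, List.length_nil, Nat.cast_add,
        Nat.cast_one, zero_add] at this ⊢
      rw [this]
      simp only [hx, sub_self]
      ring_nf
    · rw [if_neg (by omega), if_neg (by intro h; exact hc ⟨h.1, h.2⟩)]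
      have := ih (u ++ [x]) res j i
        (by subst hg; simp) h0j hji (by simp; omega)
      simp only [List.length_append, List.length_cons, List.length_nil, Nat.cast_add,
        Nat.cast_one, zero_add] at this ⊢
      rw [this]
      simp only [hx]
      ring_nf

-- ===== VERDICT (by name: the statement is the Claim_ definition above) =====
theorem maximumGroups_spec : Claim_equal_maximumGroups := by
  intro grades _
  unfold Spec_maximumGroups maximumGroups maximumGroups_alt
  set g := PySem.List.sorted grades (fun x => x) false with hgdef
  have := pvMain g g [] 0 0 0 (by simp) le_rfl le_rfl (by simp)
  simp only [List.length_nil, Nat.cast_zero, zero_add, pvS_zero, sub_self] at this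
  simp only [PySem.List.len_eq]
  rw [this]
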